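-- pv_equiv track=rewrite | github.com/carlosfieldsierra/Algorithm-Practice | GreedyAlgorthims/MajorityElment/Attempt.py | solve
-- ===== SOURCE A (Python) =====
-- def solve(A):
--     times = {}
--     for elem in A:
--         if elem not in times:
--             times[elem] = 0
--         times[elem] +=1
--
--     timesLst = [(num,count) for num,count in times.items()]
--     timesLst.sort(key=lambda x: x[1])
--     return timesLst[-1][0]
-- ===== SOURCE B (Python) =====
-- def solve(A):
--     best = A[0]
--     best_count = 0
--     seen = set()
--     for elem in A:
--         if elem in seen:
--             continue
--         seen.add(elem)
--         c = A.count(elem)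
--         if c >= best_count:
--             best, best_count = elem, c
--     return best
-- ===== Notes on version B (the rewrite author's own statement) =====
-- stated objective: simpler
-- what changed: Replaces the frequency dict plus full stable sort with a single argmax sweep that rescans with list.count per distinct element, keeping ties to the latest first occurrence via >=; no sort, no dict.
import Mathlib
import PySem

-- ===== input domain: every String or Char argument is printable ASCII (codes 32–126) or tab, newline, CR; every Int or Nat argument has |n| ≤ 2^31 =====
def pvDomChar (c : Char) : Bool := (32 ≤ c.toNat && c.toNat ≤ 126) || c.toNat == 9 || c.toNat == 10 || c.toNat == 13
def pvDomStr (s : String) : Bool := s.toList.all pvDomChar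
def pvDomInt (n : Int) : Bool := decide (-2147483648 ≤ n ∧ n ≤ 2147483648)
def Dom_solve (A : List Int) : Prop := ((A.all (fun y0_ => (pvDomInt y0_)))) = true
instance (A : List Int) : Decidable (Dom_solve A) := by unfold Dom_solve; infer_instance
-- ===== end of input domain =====

-- B drops A's frequency dict and stable sort: one argmax sweep over the distinct elements
-- (dedup via a seen-set), recounting each with list.count and breaking ties to the latest
-- first occurrence with >=; same value everywhere both return (both raise on []).

-- ===== PORT A =====
def solve (A : List Int) : Int :=
  let times : PySem.Dict Int Int :=
    A.foldl (fun times elem =>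
      let times := if times.contains elem then times else times.insert elem 0
      times.insert elem (times.getD elem 0 + 1)) PySem.Dict.empty
  let timesLst := times.items.map (fun p => (p.1, p.2))
  let timesLst := PySem.List.sorted timesLst (fun x => x.2) false
  ((PySem.List.pyGet? timesLst (-1)).getD (0, 0)).1   -- none (IndexError) only when A = [], excluded by Pre_

-- ===== PORT B =====
def solve_alt (A : List Int) : Int :=
  match A with
  | [] => 0   -- unreachable under Pre_: best = A[0] raises IndexError in Python
  | a0 :: _ =>
    (A.foldl (fun (st : PySem.Set Int × Int × Int) elem =>
        if st.1.contains elem then st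
        else
          let seen := st.1.add elem
          let c : Int := (A.count elem : Int)
          if st.2.2 ≤ c then (seen, elem, c) else (seen, st.2.1, st.2.2))
      (PySem.Set.empty, a0, 0)).2.1

-- ===== PRECONDITION & SPEC =====
-- Pre_ excludes only the empty list, on which both Pythons raise IndexError.
def Pre_solve (A : List Int) : Prop := A ≠ []
instance (A : List Int) : Decidable (Pre_solve A) := by unfold Pre_solve; infer_instance
def pvWitness_solve : List Int := ([1, 2, 2, 1, 3])
def Spec_solve (A : List Int) (out : Int) : Prop := out = solve_alt A
instance (A : List Int) (out : Int) : Decidable (Spec_solve A out) := by unfold Spec_solve; infer_instance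

-- ===== CLAIM (what is proved, stated in full; the proofs are below) =====
def Claim_equal_solve : Prop := ∀ (A : List Int), Dom_solve A → Pre_solve A → Spec_solve A (solve A)

-- ===== LEMMAS AND PROOFS =====

-- the tie-to-the-right argmax step both programs reduce to
def pvArgmax (p q : Int × Int) : Int × Int := if p.2 ≤ q.2 then q else p

-- the distinct fresh elements of a list relative to a seen-set, in first-occurrence order
def pvFresh (seen : List Int) : List Int → List Int
  | [] => []
  | x :: l => if seen.contains x then pvFresh seen l else x :: pvFresh (seen ++ [x]) l

lemma pvFresh_append (l : List Int) : ∀ seen : List Int,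
    seen ++ pvFresh seen l = l.foldl PySem.Set.add seen := by
  induction l with
  | nil => intro seen; simp [pvFresh]
  | cons x l ih =>
    intro seen
    by_cases h : x ∈ seen
    · simp [pvFresh, h, PySem.Set.add, ih]
    · have hadd : PySem.Set.add seen x = seen ++ [x] := by simp [PySem.Set.add, h]
      simp only [pvFresh, List.contains_eq_mem, h, decide_false, Bool.false_eq_true,
        if_false, List.foldl_cons, hadd]
      rw [← ih (seen ++ [x])]
      simp

lemma pvFresh_nil_eq_ofList (l : List Int) : pvFresh [] l = PySem.Set.ofList l := by
  have := pvFresh_append l []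
  simpa [PySem.Set.ofList, PySem.Set.empty] using this

-- A's dict-building step is Counter's step
lemma stepA_eq (d : PySem.Dict Int Int) (x : Int) :
    (let d' := if d.contains x then d else d.insert x 0
     d'.insert x (d'.getD x 0 + 1)) = d.modify x 0 (· + 1) := by
  by_cases h : d.contains x
  · simp [h, PySem.Dict.modify]
  · simp only [h, Bool.false_eq_true, if_false]
    rw [PySem.Dict.getD_insert_self, PySem.Dict.insert_insert_self, PySem.Dict.modify,
      PySem.Dict.getD_of_not_contains _ 0 (by simpa using h)]

-- last element of a stable insertion, below the current maximum
lemma insertBy_ne_nil (before : Int × Int → Int × Int → Bool) (x : Int × Int)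
    (ys : List (Int × Int)) : PySem.List.insertBy before x ys ≠ [] := by
  intro hc
  have : x ∈ PySem.List.insertBy before x ys := (PySem.List.mem_insertBy _ _ _ _).mpr (Or.inl rfl)
  simp [hc] at this

lemma insertBy_getLast?_of_lt (x : Int × Int) : ∀ (acc : List (Int × Int)) (p : Int × Int),
    acc.getLast? = some p → x.2 < p.2 →
    (PySem.List.insertBy (fun a b => decide (a.2 < b.2)) x acc).getLast? = some p := by
  intro acc
  induction acc with
  | nil => intro p hp; simp at hp
  | cons y ys ih =>
    intro p hp hx
    by_cases hb : x.2 < y.2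
    · rw [PySem.List.insertBy]
      simp only [hb, decide_true, if_true]
      rw [List.getLast?_cons_cons]
      exact hp
    · rw [PySem.List.insertBy]
      simp only [hb, decide_false, Bool.false_eq_true, if_false]
      cases ys with
      | nil =>
        simp only [List.getLast?_singleton, Option.some_inj] at hp
        subst hp; exact absurd hx hb
      | cons z zs =>
        rw [List.getLast?_cons_cons] at hp
        have hins := ih p hp hx
        cases hcase : PySem.List.insertBy (fun a b => decide (a.2 < b.2)) x (z :: zs) with
        | nil => exact absurd hcase (insertBy_ne_nil _ _ _)
        | cons w ws =>
          rw [hcase] at hins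
          rw [List.getLast?_cons_cons]
          exact hins

-- last of the insertion-sort fold is the tie-to-the-right argmax fold
lemma sorted_fold_getLast? (L : List (Int × Int)) : ∀ (acc : List (Int × Int)) (p : Int × Int),
    acc.Pairwise (fun a b => a.2 ≤ b.2) → acc.getLast? = some p → (∀ q ∈ acc, q.2 ≤ p.2) →
    (L.foldl (fun acc x => PySem.List.insertBy (fun a b => decide (a.2 < b.2)) x acc) acc).getLast?
      = some (L.foldl pvArgmax p) := by
  induction L with
  | nil => intro acc p _ hp _; simpa using hp
  | cons x L ih =>
    intro acc p hpw hp hmax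
    simp only [List.foldl_cons]
    by_cases h : p.2 ≤ x.2
    · have hall : ∀ y ∈ acc, (fun a b => decide (a.2 < b.2)) x y = false := by
        intro y hy
        simp only [decide_eq_false_iff_not, not_lt]
        exact le_trans (hmax y hy) h
      rw [PySem.List.insertBy_of_forall_not_before _ _ _ hall]
      have hargs : pvArgmax p x = x := by simp [pvArgmax, h]
      rw [hargs]
      refine ih (acc ++ [x]) x ?_ (by simp) ?_
      · refine List.pairwise_append.mpr ⟨hpw, List.pairwise_singleton _ _, ?_⟩
        intro a ha b hb
        simp only [List.mem_singleton] at hb; subst hb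
        exact le_trans (hmax a ha) h
      · intro q hq
        rcases List.mem_append.mp hq with hq | hq
        · exact le_trans (hmax q hq) h
        · simp only [List.mem_singleton] at hq; subst hq; exact le_rfl
    · have hx : x.2 < p.2 := lt_of_not_ge h
      have hargs : pvArgmax p x = p := by simp [pvArgmax, h]
      have hlast := insertBy_getLast?_of_lt x acc p hp hx
      have hpw' := PySem.List.insertBy_pairwise_le (fun a : Int × Int => a.2) x acc hpw
      have hmax' : ∀ q ∈ PySem.List.insertBy (fun a b => decide (a.2 < b.2)) x acc, q.2 ≤ p.2 := by
        intro q hq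
        rcases (PySem.List.mem_insertBy _ _ _ _).mp hq with hq | hq
        · subst hq; exact le_of_lt hx
        · exact hmax q hq
      rw [ih _ p hpw' hlast hmax', hargs]

-- B's seen-set fold is the plain argmax fold over the fresh distinct elements
lemma stepB_fold (A : List Int) (l : List Int) : ∀ (seen : List Int) (p : Int × Int),
    (l.foldl (fun (st : PySem.Set Int × Int × Int) elem =>
        if st.1.contains elem then st
        else
          let seen := st.1.add elem
          let c : Int := (A.count elem : Int)
          if st.2.2 ≤ c then (seen, elem, c) else (seen, st.2.1, st.2.2)) (seen, p)).2
      = (pvFresh seen l).foldl (fun s k => pvArgmax s (k, (A.count k : Int))) p := by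
  induction l with
  | nil => intro seen p; simp [pvFresh]
  | cons x l ih =>
    intro seen p
    by_cases h : x ∈ seen
    · simpa [pvFresh, h] using ih seen p
    · have hadd : PySem.Set.add seen x = seen ++ [x] := by simp [PySem.Set.add, h]
      by_cases hc : p.2 ≤ (A.count x : Int)
      · simpa [pvFresh, h, hadd, hc, pvArgmax] using ih (seen ++ [x]) (x, (A.count x : Int))
      · simpa [pvFresh, h, hadd, hc, pvArgmax] using ih (seen ++ [x]) p

-- head of an add-fold with a nonempty start is the start's head
lemma foldl_add_head? (l : List Int) : ∀ s : List Int, s ≠ [] →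
    (l.foldl PySem.Set.add s).head? = s.head? := by
  induction l with
  | nil => intro s _; rfl
  | cons x l ih =>
    intro s hs
    by_cases h : x ∈ s
    · rw [List.foldl_cons, show PySem.Set.add s x = s by simp [PySem.Set.add, h]]
      exact ih s hs
    · rw [List.foldl_cons, show PySem.Set.add s x = s ++ [x] by simp [PySem.Set.add, h]]
      rw [ih (s ++ [x]) (by simp)]
      cases s with
      | nil => exact absurd rfl hs
      | cons a t => simp

lemma ofList_head? (a0 : Int) (rest : List Int) :
    (PySem.Set.ofList (a0 :: rest)).head? = some a0 := by
  rw [PySem.Set.ofList, List.foldl_cons,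
    show PySem.Set.add PySem.Set.empty a0 = [a0] from rfl]
  rw [foldl_add_head? rest [a0] (by simp)]
  rfl

lemma pyGet?_neg_one_getLast? (l : List (Int × Int)) :
    PySem.List.pyGet? l (-1) = l.getLast? := by
  cases l with
  | nil => rfl
  | cons x t =>
    simp only [PySem.List.pyGet?, PySem.List.pyIdx?]
    norm_num
    rw [List.getLast?_eq_getElem?]
    simp

-- ===== VERDICT (by name: the statement is the Claim_ definition above) =====
theorem solve_spec : Claim_equal_solve := by
  intro A _ hpre
  unfold Spec_solve
  cases A with
  | nil => exact absurd rfl hpre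
  | cons a0 rest =>
    -- B side, written as the fold stepB_fold speaks about
    have halt : solve_alt (a0 :: rest) =
        (((a0 :: rest)).foldl (fun (st : PySem.Set Int × Int × Int) elem =>
            if st.1.contains elem then st
            else
              let seen := st.1.add elem
              let c : Int := ((a0 :: rest).count elem : Int)
              if st.2.2 ≤ c then (seen, elem, c) else (seen, st.2.1, st.2.2))
          (PySem.Set.empty, a0, 0)).2.1 := rfl
    rw [halt]
    -- B side first: the seen fold is the argmax fold over the distinct elements
    rw [stepB_fold (a0 :: rest) (a0 :: rest) PySem.Set.empty ((a0 : Int), (0 : Int))]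
    rw [show (PySem.Set.empty : PySem.Set Int) = ([] : List Int) from rfl, pvFresh_nil_eq_ofList]
    -- A side: the dict is Counter(A)
    have hsolve : solve (a0 :: rest) =
        ((PySem.List.pyGet? (PySem.List.sorted
            (((a0 :: rest).foldl (fun (times : PySem.Dict Int Int) elem =>
                let times := if times.contains elem then times else times.insert elem 0
                times.insert elem (times.getD elem 0 + 1)) PySem.Dict.empty).items.map
              (fun p => (p.1, p.2)))
            (fun x => x.2) false) (-1)).getD (0, 0)).1 := rfl
    rw [hsolve]
    have hfun : (fun (times : PySem.Dict Int Int) (elem : Int) =>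
        let times := if times.contains elem then times else times.insert elem 0
        times.insert elem (times.getD elem 0 + 1)) = fun d x => d.modify x 0 (· + 1) :=
      funext fun d => funext fun x => stepA_eq d x
    rw [hfun, ← PySem.Dict.counter_eq_foldl, PySem.Dict.items_counter]
    -- the identity re-packing of the pairs
    have hid : (List.map (fun k => (k, ((a0 :: rest).count k : Int)))
          (PySem.Set.ofList (a0 :: rest))).map (fun p => (p.1, p.2))
        = List.map (fun k => (k, ((a0 :: rest).count k : Int)))
            (PySem.Set.ofList (a0 :: rest)) := by simp
    rw [hid]
    -- the distinct elements, with a0 in front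
    have hK : PySem.Set.ofList (a0 :: rest) = a0 :: (PySem.Set.ofList (a0 :: rest)).tail := by
      have h1 : (PySem.Set.ofList (a0 :: rest)).head? = some a0 := ofList_head? a0 rest
      cases hK0 : PySem.Set.ofList (a0 :: rest) with
      | nil => rw [hK0] at h1; simp at h1
      | cons b t => rw [hK0] at h1; simp at h1; simp [h1]
    -- last of the stable sort is the argmax fold
    rw [pyGet?_neg_one_getLast?, PySem.List.sorted_eq_foldl_insertBy, hK]
    simp only [List.map_cons, List.foldl_cons]
    rw [show PySem.List.insertBy (fun a b : Int × Int => decide (a.2 < b.2))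
        (a0, ((a0 :: rest).count a0 : Int)) [] = [(a0, ((a0 :: rest).count a0 : Int))] from rfl]
    rw [sorted_fold_getLast? _ [(a0, ((a0 :: rest).count a0 : Int))]
        (a0, ((a0 :: rest).count a0 : Int))
        (List.pairwise_singleton _ _) (by simp) (by simp)]
    simp only [Option.getD_some]
    rw [show pvArgmax ((a0 : Int), (0 : Int)) (a0, ((a0 :: rest).count a0 : Int)) =
        (a0, ((a0 :: rest).count a0 : Int)) by simp [pvArgmax]; omega]
    rw [List.foldl_map]
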